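-- pv_equiv track=rewrite | github.com/Ellies1/thesis01 | powerbar.py | classify_stage
-- ===== SOURCE A (Python) =====
-- def classify_stage(name):
--     name_lower = name.lower()
--     if "store_sales" in name_lower and "exchange" in name_lower:
--         return "Join"
--     if "createtable" in name_lower or "insert" in name_lower or "save" in name_lower or "output" in name_lower:
--         return "Write"
--     if "scan" in name_lower:
--         return "Scan"
--     if any(keyword in name_lower for keyword in [
--         "aggregate", "hashaggregate", "sortaggregate",
--         "objecthashaggregate", "partialaggregate", "finalaggregate"
--     ]):
--         return "Aggregate"
--     if "parallelize" in name_lower or "map;" in name_lower: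
--         return "Init(Map & Parallelize)"
--     if "takeordered" in name_lower:
--         return "TakeOrdered"
--     if "union" in name_lower:
--         return "Union"
--     if "exchange" in name_lower:
--         return "Exchange(shuffle/aggregate)"
--     return "Other"
-- ===== SOURCE B (Python) =====
-- KEYWORDS = ["store_sales", "exchange", "createtable", "insert", "save", "output",
--             "scan", "aggregate", "parallelize", "map;", "takeordered", "union"]
--
--
-- def classify_stage(name):
--     # Pass 1: one left-to-right scan over the lowered name collecting, position by
--     # position, the set of keywords that start somewhere in it.  ("aggregate" alone
--     # covers all of A's hash/sort/objecthash/partial/final aggregate variants, since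
--     # each contains "aggregate" as a substring.)
--     s = name.lower()
--     hit = set()
--     for i in range(len(s) + 1):
--         for k in KEYWORDS:
--             if s.startswith(k, i):
--                 hit.add(k)
--     # Pass 2: decide the label from the collected flags, in priority order.
--     if "store_sales" in hit and "exchange" in hit:
--         return "Join"
--     if any(k in hit for k in ("createtable", "insert", "save", "output")):
--         return "Write"
--     if "scan" in hit:
--         return "Scan"
--     if "aggregate" in hit:
--         return "Aggregate"
--     if "parallelize" in hit or "map;" in hit:
--         return "Init(Map & Parallelize)"
--     if "takeordered" in hit:
--         return "TakeOrdered"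
--     if "union" in hit:
--         return "Union"
--     if "exchange" in hit:
--         return "Exchange(shuffle/aggregate)"
--     return "Other"
-- ===== Notes on version B (the rewrite author's own statement) =====
-- stated objective: alternative
-- what changed: Instead of testing each rule's keywords against the whole name, B makes one position-by-position scan of the lowered name collecting the set of keywords that occur in it (collapsing the six aggregate variants into the single keyword 'aggregate'), then decides the label from those flags in a second stage.
import Mathlib
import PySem

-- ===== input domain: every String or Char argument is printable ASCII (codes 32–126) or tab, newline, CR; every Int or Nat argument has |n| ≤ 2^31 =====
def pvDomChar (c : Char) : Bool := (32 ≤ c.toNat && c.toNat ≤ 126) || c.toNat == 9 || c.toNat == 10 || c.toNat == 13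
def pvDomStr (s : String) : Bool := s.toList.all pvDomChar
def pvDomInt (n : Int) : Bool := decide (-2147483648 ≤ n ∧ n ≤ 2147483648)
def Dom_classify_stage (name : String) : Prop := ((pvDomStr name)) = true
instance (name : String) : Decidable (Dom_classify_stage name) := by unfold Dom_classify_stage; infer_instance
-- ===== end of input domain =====

-- B scans the lowered name position by position once, collecting the set of keywords that
-- occur in it (the six aggregate variants collapse to the one keyword "aggregate"), and
-- then decides the label from those flags; alternative decomposition, same cost.

-- ===== PORT A =====
def classify_stage (name : String) : String :=
  let nl := PySem.Str.lower name
  if PySem.Str.isIn "store_sales" nl && PySem.Str.isIn "exchange" nl then "Join"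
  else if PySem.Str.isIn "createtable" nl || PySem.Str.isIn "insert" nl ||
          PySem.Str.isIn "save" nl || PySem.Str.isIn "output" nl then "Write"
  else if PySem.Str.isIn "scan" nl then "Scan"
  else if List.any ["aggregate", "hashaggregate", "sortaggregate",
                    "objecthashaggregate", "partialaggregate", "finalaggregate"]
            (fun keyword => PySem.Str.isIn keyword nl) then "Aggregate"
  else if PySem.Str.isIn "parallelize" nl || PySem.Str.isIn "map;" nl then "Init(Map & Parallelize)"
  else if PySem.Str.isIn "takeordered" nl then "TakeOrdered"
  else if PySem.Str.isIn "union" nl then "Union"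
  else if PySem.Str.isIn "exchange" nl then "Exchange(shuffle/aggregate)"
  else "Other"

-- ===== PORT B =====
def pvKeywords : List String :=
  ["store_sales", "exchange", "createtable", "insert", "save", "output",
   "scan", "aggregate", "parallelize", "map;", "takeordered", "union"]

-- one pass over the positions 0..len(s); s.startswith(k, i) is exactly
-- 'k.toList is a prefix of s.drop i' for 0 ≤ i ≤ len(s)
def pvHits (s : List Char) : PySem.Set String :=
  (List.range (s.length + 1)).foldl
    (fun hit i =>
      pvKeywords.foldl
        (fun hit k => if List.isPrefixOf k.toList (s.drop i) then PySem.Set.add hit k else hit)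
        hit)
    PySem.Set.empty

def classify_stage_alt (name : String) : String :=
  let s := (PySem.Str.lower name).toList
  let hit := pvHits s
  if PySem.Set.contains hit "store_sales" && PySem.Set.contains hit "exchange" then "Join"
  else if List.any ["createtable", "insert", "save", "output"]
            (fun k => PySem.Set.contains hit k) then "Write"
  else if PySem.Set.contains hit "scan" then "Scan"
  else if PySem.Set.contains hit "aggregate" then "Aggregate"
  else if PySem.Set.contains hit "parallelize" || PySem.Set.contains hit "map;" then "Init(Map & Parallelize)"
  else if PySem.Set.contains hit "takeordered" then "TakeOrdered"
  else if PySem.Set.contains hit "union" then "Union"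
  else if PySem.Set.contains hit "exchange" then "Exchange(shuffle/aggregate)"
  else "Other"

-- ===== PRECONDITION & SPEC =====
def Spec_classify_stage (name : String) (out : String) : Prop := out = classify_stage_alt name
instance (name : String) (out : String) : Decidable (Spec_classify_stage name out) := by unfold Spec_classify_stage; infer_instance

-- ===== CLAIM =====
def Claim_equal_classify_stage : Prop := ∀ (name : String), Dom_classify_stage name → Spec_classify_stage name (classify_stage name)

-- ===== LEMMAS AND PROOFS =====
theorem mem_foldl_addIf (p : String → Bool) (ks : List String) (h0 : PySem.Set String) (x : String) :
    x ∈ ks.foldl (fun h k => if p k then PySem.Set.add h k else h) h0 ↔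
      x ∈ h0 ∨ (x ∈ ks ∧ p x = true) := by
  induction ks generalizing h0 with
  | nil => simp
  | cons a t ih =>
    simp only [List.foldl_cons]
    by_cases hpa : p a = true
    · rw [if_pos hpa, ih]
      simp only [PySem.Set.mem_add, List.mem_cons]
      constructor
      · rintro (⟨hx | rfl⟩ | ⟨ht, hp⟩)
        · exact Or.inl hx
        · exact Or.inr ⟨Or.inl rfl, hpa⟩
        · exact Or.inr ⟨Or.inr ht, hp⟩
      · rintro (hx | ⟨rfl | ht, hp⟩)
        · exact Or.inl (Or.inl hx)
        · exact Or.inl (Or.inr rfl)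
        · exact Or.inr ⟨ht, hp⟩
    · rw [if_neg hpa, ih]
      simp only [List.mem_cons]
      constructor
      · rintro (hx | ⟨ht, hp⟩)
        · exact Or.inl hx
        · exact Or.inr ⟨Or.inr ht, hp⟩
      · rintro (hx | ⟨rfl | ht, hp⟩)
        · exact Or.inl hx
        · exact absurd hp hpa
        · exact Or.inr ⟨ht, hp⟩

theorem mem_foldl_scan (q : Nat → String → Bool) (is : List Nat) (h0 : PySem.Set String) (x : String) :
    x ∈ is.foldl
        (fun h i => pvKeywords.foldl (fun h k => if q i k then PySem.Set.add h k else h) h) h0 ↔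
      x ∈ h0 ∨ ∃ i ∈ is, x ∈ pvKeywords ∧ q i x = true := by
  induction is generalizing h0 with
  | nil => simp
  | cons a t ih =>
    simp only [List.foldl_cons]
    rw [ih, mem_foldl_addIf]
    constructor
    · rintro ((hx | ⟨hk, hq⟩) | ⟨i, hi, hk, hq⟩)
      · exact Or.inl hx
      · exact Or.inr ⟨a, List.mem_cons_self .., hk, hq⟩
      · exact Or.inr ⟨i, List.mem_cons_of_mem _ hi, hk, hq⟩
    · rintro (hx | ⟨i, hi, hk, hq⟩)
      · exact Or.inl (Or.inl hx)
      · rcases List.mem_cons.mp hi with rfl | hi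
        · exact Or.inl (Or.inr ⟨hk, hq⟩)
        · exact Or.inr ⟨i, hi, hk, hq⟩

theorem mem_pvHits (s : List Char) (x : String) :
    x ∈ pvHits s ↔ x ∈ pvKeywords ∧ PySem.Chars.isIn x.toList s = true := by
  unfold pvHits
  rw [mem_foldl_scan]
  simp only [PySem.Set.empty, List.not_mem_nil, false_or, List.mem_range]
  constructor
  · rintro ⟨i, _, hk, hp⟩
    refine ⟨hk, ?_⟩
    rw [← PySem.Chars.exists_prefix_drop_iff_isIn]
    exact ⟨i, List.isPrefixOf_iff_prefix.mp hp⟩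
  · rintro ⟨hk, hin⟩
    obtain ⟨j, hj⟩ := (PySem.Chars.exists_prefix_drop_iff_isIn x.toList s).mpr hin
    refine ⟨min j s.length, by omega, hk, ?_⟩
    rw [List.isPrefixOf_iff_prefix]
    rcases Nat.lt_or_ge s.length j with h | h
    · have h1 : s.drop j = [] := List.drop_eq_nil_of_le (by omega)
      have h2 : s.drop (min j s.length) = [] := List.drop_eq_nil_of_le (by omega)
      rw [h2]; rw [h1] at hj; exact hj
    · simpa [Nat.min_eq_left h] using hj

theorem contains_pvHits (s : List Char) (k : String) (hk : k ∈ pvKeywords) :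
    PySem.Set.contains (pvHits s) k = PySem.Chars.isIn k.toList s := by
  rw [Bool.eq_iff_iff, PySem.Set.contains_iff, mem_pvHits]
  simp [hk]

theorem agg_collapse (l : List Char) :
    (PySem.Chars.isIn "aggregate".toList l ||
      (PySem.Chars.isIn "hashaggregate".toList l ||
        (PySem.Chars.isIn "sortaggregate".toList l ||
          (PySem.Chars.isIn "objecthashaggregate".toList l ||
            (PySem.Chars.isIn "partialaggregate".toList l ||
              PySem.Chars.isIn "finalaggregate".toList l))))) =
      PySem.Chars.isIn "aggregate".toList l := by
  cases hb : PySem.Chars.isIn "aggregate".toList l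
  · have hv : ∀ v : String, ("aggregate".toList <:+: v.toList) →
        PySem.Chars.isIn v.toList l = false := by
      intro v hav
      rw [PySem.Chars.isIn_eq_false_iff]
      intro hvl
      have ht : PySem.Chars.isIn "aggregate".toList l = true :=
        (PySem.Chars.isIn_iff_infix _ _).mpr (hav.trans hvl)
      exact (Bool.false_ne_true (hb.symm.trans ht)).elim
    rw [hv "hashaggregate" (by decide), hv "sortaggregate" (by decide),
      hv "objecthashaggregate" (by decide), hv "partialaggregate" (by decide),
      hv "finalaggregate" (by decide)]
    rfl
  · simp

theorem classify_stage_eq (name : String) : classify_stage name = classify_stage_alt name := by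
  simp only [classify_stage, classify_stage_alt, PySem.Str.isIn_eq, List.any, Bool.or_false,
    contains_pvHits _ _ (by decide : ("store_sales" : String) ∈ pvKeywords),
    contains_pvHits _ _ (by decide : ("exchange" : String) ∈ pvKeywords),
    contains_pvHits _ _ (by decide : ("createtable" : String) ∈ pvKeywords),
    contains_pvHits _ _ (by decide : ("insert" : String) ∈ pvKeywords),
    contains_pvHits _ _ (by decide : ("save" : String) ∈ pvKeywords),
    contains_pvHits _ _ (by decide : ("output" : String) ∈ pvKeywords),
    contains_pvHits _ _ (by decide : ("scan" : String) ∈ pvKeywords),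
    contains_pvHits _ _ (by decide : ("aggregate" : String) ∈ pvKeywords),
    contains_pvHits _ _ (by decide : ("parallelize" : String) ∈ pvKeywords),
    contains_pvHits _ _ (by decide : ("map;" : String) ∈ pvKeywords),
    contains_pvHits _ _ (by decide : ("takeordered" : String) ∈ pvKeywords),
    contains_pvHits _ _ (by decide : ("union" : String) ∈ pvKeywords),
    Bool.or_assoc]
  rw [agg_collapse]
  rfl

-- ===== VERDICT =====
theorem classify_stage_spec : Claim_equal_classify_stage := by
  intro name _
  unfold Spec_classify_stage
  exact classify_stage_eq name
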